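-- pv_equiv track=rewrite | github.com/ShinminHsu/LeetCode | codingTest_2.py | solution
-- ===== SOURCE A (Python) =====
-- def solution(S):
--
--     # create a hash map to store the occurance of all letters in ASCII code
--     # 65: A, 97: a
--     # Space Complexity: O(1)
--     hash_map = {i: False for i in list(range(65, 91)) + list(range(97, 123))}
--
--     # update the hash map to check if the character exists
--     # Time complexity: O(N)
--     for char in S:
--         if not hash_map[ord(char)]:
--             hash_map[ord(char)] = True
--
--     largest = 0  # for storing the ASCII code of the largest letter
--
--     # Time complexity: O(N)
--     for char in S:
--
--         # only check the uppercase and skip the lowercase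
--         if ord(char) >= 91:
--             continue
--
--         # if both the uppercase and lowercase occur in S
--         if hash_map[ord(char)] and hash_map[ord(char) + 32]:
--             if ord(char) > largest:
--                 largest = ord(char)
--
--     return chr(largest) if largest != 0 else 'NO'
-- ===== SOURCE B (Python) =====
-- def solution(S):
--     # one pass to build a presence set, then scan the alphabet from Z down
--     present = set(S)
--     for code in range(90, 64, -1):
--         if chr(code) in present and chr(code + 32) in present:
--             return chr(code)
--     return 'NO'
-- ===== Notes on version B (the rewrite author's own statement) =====
-- stated objective: faster
-- what changed: B replaces A's 52-key ord-indexed boolean dict plus a second full scan of S tracking a running maximum by a presence set built in one pass and a descending scan of just the 26 uppercase codes with early exit; the constant-factor win is one scan of S instead of two plus no dict construction.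
import Mathlib
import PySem

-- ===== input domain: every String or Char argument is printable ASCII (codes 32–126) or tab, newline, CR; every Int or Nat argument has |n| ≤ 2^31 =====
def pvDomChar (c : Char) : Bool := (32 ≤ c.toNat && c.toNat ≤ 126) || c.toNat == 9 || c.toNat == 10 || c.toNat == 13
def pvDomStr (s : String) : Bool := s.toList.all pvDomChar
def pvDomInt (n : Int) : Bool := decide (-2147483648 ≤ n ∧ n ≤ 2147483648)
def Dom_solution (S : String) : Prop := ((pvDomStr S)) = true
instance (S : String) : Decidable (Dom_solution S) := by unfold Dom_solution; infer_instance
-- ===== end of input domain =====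

-- B builds a presence set in one pass and scans the 26 uppercase codes downward with early
-- exit, instead of A's ord-indexed boolean dict plus a second input scan with a running max
-- (objective: simpler).

-- ===== PORT A =====
-- hash_map[ord(char)] is ported as getD false: Pre_solution restricts to all-letter strings,
-- on which every looked-up key is present in the dict, so getD is exact there (the KeyError
-- inputs are excluded by Pre_solution).
def aMark (d : PySem.Dict Int Bool) (c : Char) : PySem.Dict Int Bool :=
  if (d.getD ((c.toNat : Int)) false) = false then d.insert ((c.toNat : Int)) true else d

def aStep (hm : PySem.Dict Int Bool) (largest : Int) (c : Char) : Int :=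
  if 91 ≤ (c.toNat : Int) then largest
  else if hm.getD ((c.toNat : Int)) false && hm.getD ((c.toNat : Int) + 32) false then
    (if largest < (c.toNat : Int) then (c.toNat : Int) else largest)
  else largest

def solution (S : String) : String :=
  let keys := PySem.List.pyRange 65 91 1 ++ PySem.List.pyRange 97 123 1
  let hm0 : PySem.Dict Int Bool := keys.foldl (fun d i => d.insert i false) PySem.Dict.empty
  let hm : PySem.Dict Int Bool := S.toList.foldl aMark hm0
  let largest : Int := S.toList.foldl (aStep hm) 0
  if largest ≠ 0 then String.ofList [Char.ofNat largest.toNat] else "NO"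

-- ===== PORT B =====
def bLoop (present : PySem.Set Char) : List Int → String
  | [] => "NO"
  | code :: rest =>
    if present.contains (Char.ofNat code.toNat) && present.contains (Char.ofNat (code + 32).toNat) then
      String.ofList [Char.ofNat code.toNat]
    else bLoop present rest

def solution_alt (S : String) : String :=
  bLoop (PySem.Set.ofList S.toList) (PySem.List.pyRange 90 64 (-1))

-- ===== PRECONDITION & SPEC =====
-- A raises KeyError on any character outside the 52 ASCII letters (its dict has only letter
-- keys); Pre_ admits exactly the strings on which A returns: all characters are ASCII letters.
def Pre_solution (S : String) : Prop :=
  S.toList.all (fun c => decide ((65 ≤ c.toNat ∧ c.toNat ≤ 90) ∨ (97 ≤ c.toNat ∧ c.toNat ≤ 122))) = true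
instance (S : String) : Decidable (Pre_solution S) := by unfold Pre_solution; infer_instance
def pvWitness_solution : String := "aA"

def Spec_solution (S : String) (out : String) : Prop := out = solution_alt S
instance (S : String) (out : String) : Decidable (Spec_solution S out) := by unfold Spec_solution; infer_instance

-- ===== CLAIM (what is proved, stated in full; the proofs are below) =====
def Claim_equal_solution : Prop := ∀ (S : String), Dom_solution S → Pre_solution S → Spec_solution S (solution S)

-- ===== LEMMAS AND PROOFS =====

-- `memb L k` : some character of L has code k
def memb (L : List Char) (k : Int) : Bool := L.any (fun c => ((c.toNat : Int)) == k)

-- the condition under which A's second loop updates its running maximum region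
def aCond (L : List Char) (c : Char) : Bool :=
  !(decide (91 ≤ (c.toNat : Int))) && (memb L ((c.toNat : Int)) && memb L ((c.toNat : Int) + 32))

theorem toNat_ofNat_small (n : Nat) (h : n < 55296) : (Char.ofNat n).toNat = n := by
  rw [Char.toNat_ofNat]
  simp [Nat.isValidChar, h]

theorem ord_ofNat (k : Int) (h0 : 0 ≤ k) (h : k ≤ 122) :
    (((Char.ofNat k.toNat).toNat : Nat) : Int) = k := by
  rw [toNat_ofNat_small _ (by omega)]
  omega

theorem memb_iff (L : List Char) (k : Int) (h1 : 65 ≤ k) (h2 : k ≤ 122) :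
    memb L k = true ↔ Char.ofNat k.toNat ∈ L := by
  unfold memb
  rw [List.any_eq_true]
  constructor
  · rintro ⟨c, hc, hbeq⟩
    have heq : (c.toNat : Int) = k := by exact_mod_cast beq_iff_eq.mp hbeq
    have hcn : c.toNat = k.toNat := by omega
    rwa [← hcn, Char.ofNat_toNat]
  · intro hmem
    exact ⟨_, hmem, by rw [beq_iff_eq]; exact ord_ofNat k (by omega) h2⟩

theorem guard_iff (L : List Char) (k : Int) (h1 : 65 ≤ k) (h2 : k ≤ 90) :
    ((PySem.Set.ofList L).contains (Char.ofNat k.toNat) &&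
      (PySem.Set.ofList L).contains (Char.ofNat (k + 32).toNat)) = true
    ↔ (memb L k = true ∧ memb L (k + 32) = true) := by
  rw [Bool.and_eq_true, PySem.Set.contains_iff, PySem.Set.contains_iff,
      PySem.Set.mem_ofList, PySem.Set.mem_ofList,
      memb_iff L k h1 (by omega), memb_iff L (k + 32) (by omega) (by omega)]

theorem aCond_char (L : List Char) (k : Int) (h1 : 65 ≤ k) (h2 : k ≤ 90)
    (hm1 : memb L k = true) (hm2 : memb L (k + 32) = true) :
    aCond L (Char.ofNat k.toNat) = true := by
  unfold aCond
  rw [ord_ofNat k (by omega) (by omega)]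
  simp [hm1, hm2]
  omega

theorem getD_foldl_insert_false (l : List Int) :
    ∀ (d : PySem.Dict Int Bool), (∀ j, d.getD j false = false) →
      ∀ k, (l.foldl (fun d i => d.insert i false) d).getD k false = false := by
  induction l with
  | nil => intro d h k; exact h k
  | cons i t ih =>
    intro d h k
    simp only [List.foldl_cons]
    refine ih _ (fun j => ?_) k
    rw [PySem.Dict.getD_insert]
    split_ifs with hj
    · rfl
    · exact h j

theorem getD_foldl_aMark (l : List Char) :
    ∀ (d : PySem.Dict Int Bool) (k : Int),
      (l.foldl aMark d).getD k false = (d.getD k false || memb l k) := by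
  induction l with
  | nil => intro d k; simp [memb]
  | cons c t ih =>
    intro d k
    simp only [List.foldl_cons]
    rw [ih]
    have hstep : (aMark d c).getD k false = (d.getD k false || ((c.toNat : Int) == k)) := by
      unfold aMark
      split_ifs with hd
      · rw [PySem.Dict.getD_insert]
        by_cases hk : k = (c.toNat : Int)
        · subst hk; simp [hd]
        · have hb : (((c.toNat : Int)) == k) = false := by
            rw [beq_eq_false_iff_ne]; exact fun h => hk h.symm
          simp [hk, hb]
      · simp only [Bool.not_eq_false] at hd
        by_cases hk : k = (c.toNat : Int)
        · subst hk; simp [hd]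
        · have hb : (((c.toNat : Int)) == k) = false := by
            rw [beq_eq_false_iff_ne]; exact fun h => hk h.symm
          simp [hb]
    rw [hstep]
    unfold memb
    simp [Bool.or_assoc]

theorem aStep_props (L : List Char) (hm : PySem.Dict Int Bool)
    (hhm : ∀ k, hm.getD k false = memb L k) (a : Int) (c : Char) :
    a ≤ aStep hm a c ∧ (aCond L c = true → (c.toNat : Int) ≤ aStep hm a c) ∧
      (aStep hm a c = a ∨ (aCond L c = true ∧ aStep hm a c = (c.toNat : Int))) := by
  unfold aStep aCond
  simp only [hhm]
  split_ifs with h1 h2 h3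
  · simp [h1]
  · refine ⟨by omega, fun _ => by omega, Or.inr ⟨?_, rfl⟩⟩
    simp [h2]
    omega
  · refine ⟨le_refl a, fun _ => by omega, Or.inl rfl⟩
  · refine ⟨le_refl a, fun hc => ?_, Or.inl rfl⟩
    exfalso
    simp [h1] at hc
    exact h2 (by simp [hc.1, hc.2])

theorem foldl_aStep_char (L : List Char) (hm : PySem.Dict Int Bool)
    (hhm : ∀ k, hm.getD k false = memb L k) (l : List Char) :
    ∀ (a : Int),
      a ≤ l.foldl (aStep hm) a ∧
      (∀ c ∈ l, aCond L c = true → (c.toNat : Int) ≤ l.foldl (aStep hm) a) ∧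
      (l.foldl (aStep hm) a = a ∨
        ∃ c ∈ l, aCond L c = true ∧ l.foldl (aStep hm) a = (c.toNat : Int)) := by
  induction l with
  | nil => intro a; exact ⟨le_refl a, by simp, Or.inl rfl⟩
  | cons c t ih =>
    intro a
    simp only [List.foldl_cons]
    obtain ⟨p1, p2, p3⟩ := aStep_props L hm hhm a c
    obtain ⟨q1, q2, q3⟩ := ih (aStep hm a c)
    refine ⟨le_trans p1 q1, ?_, ?_⟩
    · intro c' hc' hcond
      rcases List.mem_cons.mp hc' with hc' | hc'
      · subst hc'; exact le_trans (p2 hcond) q1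
      · exact q2 c' hc' hcond
    · rcases q3 with hq | ⟨c', hc', hcond, heq⟩
      · rcases p3 with hp | ⟨hcond, hp⟩
        · left; rw [hq, hp]
        · right; exact ⟨c, List.mem_cons_self, hcond, by rw [hq, hp]⟩
      · right; exact ⟨c', List.mem_cons_of_mem _ hc', hcond, heq⟩

theorem bLoop_none (s : PySem.Set Char) (l : List Int) :
    (∀ k ∈ l, (s.contains (Char.ofNat k.toNat) && s.contains (Char.ofNat (k + 32).toNat)) = false) →
      bLoop s l = "NO" := by
  induction l with
  | nil => intro _; rfl
  | cons a t ih =>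
    intro h
    simp only [bLoop, h a List.mem_cons_self, Bool.false_eq_true, if_false]
    exact ih (fun k hk => h k (List.mem_cons_of_mem _ hk))

theorem bLoop_max (s : PySem.Set Char) (l : List Int) :
    ∀ (k : Int), l.Pairwise (· > ·) → k ∈ l →
      (s.contains (Char.ofNat k.toNat) && s.contains (Char.ofNat (k + 32).toNat)) = true →
      (∀ j ∈ l, (s.contains (Char.ofNat j.toNat) && s.contains (Char.ofNat (j + 32).toNat)) = true → j ≤ k) →
      bLoop s l = String.ofList [Char.ofNat k.toNat] := by
  induction l with
  | nil => intro k _ hk; exact absurd hk (List.not_mem_nil)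
  | cons a t ih =>
    intro k hs hk hp hmax
    obtain ⟨ha, ht⟩ := List.pairwise_cons.mp hs
    rcases List.mem_cons.mp hk with hk | hk
    · subst hk
      simp only [bLoop, hp, if_true]
    · have hak : a > k := ha k hk
      have hg : (s.contains (Char.ofNat a.toNat) && s.contains (Char.ofNat (a + 32).toNat)) = false := by
        by_contra hg
        have hg' := Bool.ne_false_iff.mp hg
        have := hmax a List.mem_cons_self hg'
        omega
      simp only [bLoop, hg, Bool.false_eq_true, if_false]
      exact ih k ht hk hp (fun j hj => hmax j (List.mem_cons_of_mem _ hj))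

theorem key_lemma (L : List Char)
    (hPre : ∀ c ∈ L, (65 ≤ c.toNat ∧ c.toNat ≤ 90) ∨ (97 ≤ c.toNat ∧ c.toNat ≤ 122))
    (hm : PySem.Dict Int Bool) (hhm : ∀ k, hm.getD k false = memb L k) :
    (if L.foldl (aStep hm) 0 ≠ 0 then String.ofList [Char.ofNat (L.foldl (aStep hm) 0).toNat] else "NO")
      = bLoop (PySem.Set.ofList L) (PySem.List.pyRange 90 64 (-1)) := by
  obtain ⟨h1, h2, h3⟩ := foldl_aStep_char L hm hhm L 0
  by_cases hR : L.foldl (aStep hm) 0 = 0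
  · rw [if_neg (not_not_intro hR)]
    refine (bLoop_none _ _ (fun k hk => ?_)).symm
    obtain ⟨hk1, hk2⟩ := PySem.List.mem_pyRange_neg_one.mp hk
    by_contra hg
    have hg' := Bool.ne_false_iff.mp hg
    obtain ⟨hm1, hm2⟩ := (guard_iff L k (by omega) hk2).mp hg'
    have hcj : Char.ofNat k.toNat ∈ L := (memb_iff L k (by omega) (by omega)).mp hm1
    have hle := h2 _ hcj (aCond_char L k (by omega) hk2 hm1 hm2)
    rw [ord_ofNat k (by omega) (by omega), hR] at hle
    omega
  · rw [if_pos hR]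
    rcases h3 with h3 | ⟨c, hcL, hcond, heq⟩
    · exact absurd h3 hR
    have hcond' := hcond
    unfold aCond at hcond'
    simp only [Bool.and_eq_true, Bool.not_eq_eq_eq_not, Bool.not_true, decide_eq_false_iff_not] at hcond'
    obtain ⟨hlt, hmb1, hmb2⟩ := hcond'
    have hrange : 65 ≤ (c.toNat : Int) ∧ (c.toNat : Int) ≤ 90 := by
      rcases hPre c hcL with h | h <;> omega
    rw [heq]
    refine (bLoop_max _ _ (c.toNat : Int) ?_ ?_ ?_ ?_).symm
    · rw [PySem.List.pyRange_neg_one_eq_reverse, List.pairwise_reverse]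
      have := PySem.List.pairwise_lt_pyRange_one (64 + 1) (90 + 1)
      exact this.imp (fun h => h)
    · exact PySem.List.mem_pyRange_neg_one.mpr ⟨by omega, by omega⟩
    · exact (guard_iff L _ (by omega) (by omega)).mpr ⟨hmb1, hmb2⟩
    · intro j hj hgj
      obtain ⟨hj1, hj2⟩ := PySem.List.mem_pyRange_neg_one.mp hj
      obtain ⟨hn1, hn2⟩ := (guard_iff L j (by omega) hj2).mp hgj
      have hcj : Char.ofNat j.toNat ∈ L := (memb_iff L j (by omega) (by omega)).mp hn1
      have hle := h2 _ hcj (aCond_char L j (by omega) hj2 hn1 hn2)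
      rw [ord_ofNat j (by omega) (by omega)] at hle
      omega

-- ===== VERDICT (by name: the statement is the Claim_ definition above) =====
theorem solution_spec : Claim_equal_solution := by
  intro S _ hPre
  unfold Spec_solution solution solution_alt
  refine key_lemma S.toList
    (fun c hc => of_decide_eq_true (List.all_eq_true.mp hPre c hc)) _ (fun k => ?_)
  rw [getD_foldl_aMark]
  rw [getD_foldl_insert_false _ _ (fun j => PySem.Dict.getD_empty j false) k]
  rw [Bool.false_or]
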